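-- pv_equiv track=rewrite | github.com/JammyRaptor/draphs | drafts.py | removeImprobbablemoves
-- ===== SOURCE A (Python) =====
-- def removeImprobbablemoves(moves):
--     lowest = moves[0][1][2]
--     lowestmoves = []
--
--     for i in range(len(moves)):
--         if moves[i][1][2] < lowest:
--             lowest = moves[i][1][2]
--             lowestmoves *= 0
--             lowestmoves.append(moves[i])
--         elif moves[i][1][2] == lowest:
--             lowestmoves.append(moves[i])
--     return lowestmoves
-- ===== SOURCE B (Python) =====
-- def removeImprobbablemoves(moves):
--     lowest = moves[0][1][2]
--     lowest = min(m[1][2] for m in moves)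
--     return [m for m in moves if m[1][2] == lowest]
-- ===== Notes on version B (the rewrite author's own statement) =====
-- stated objective: simpler
-- what changed: Replaces the single maintain-and-reset accumulator loop with two plain passes: a min-reduction over the third subfields followed by an order-preserving filter.
import Mathlib
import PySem

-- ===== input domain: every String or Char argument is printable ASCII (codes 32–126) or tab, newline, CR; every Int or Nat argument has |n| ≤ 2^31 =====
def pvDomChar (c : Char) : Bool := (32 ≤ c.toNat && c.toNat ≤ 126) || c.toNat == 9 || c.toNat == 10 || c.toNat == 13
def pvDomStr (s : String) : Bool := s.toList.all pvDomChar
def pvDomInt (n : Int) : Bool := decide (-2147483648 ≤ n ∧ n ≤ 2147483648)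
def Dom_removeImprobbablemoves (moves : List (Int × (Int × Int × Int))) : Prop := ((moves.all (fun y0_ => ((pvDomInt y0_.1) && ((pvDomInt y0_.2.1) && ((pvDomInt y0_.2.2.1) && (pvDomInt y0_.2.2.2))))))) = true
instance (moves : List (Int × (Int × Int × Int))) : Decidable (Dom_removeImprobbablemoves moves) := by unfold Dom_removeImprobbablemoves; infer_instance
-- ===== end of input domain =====

-- B replaces A's maintain-and-reset loop with a min-reduction pass followed by a filter pass (objective: simpler).
-- Pre_ excludes the empty list, on which A raises IndexError (moves[0]).
-- ===== PORT A =====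
-- A's loop over range(len(moves)) with state (lowest, lowestmoves); 'lowestmoves *= 0; append' = reset to [m].
def removeImprobbablemovesLoop : List (Int × (Int × Int × Int)) → Int → List (Int × (Int × Int × Int)) → List (Int × (Int × Int × Int))
  | [], _, acc => acc
  | m :: rest, lowest, acc =>
    if m.2.2.2 < lowest then removeImprobbablemovesLoop rest m.2.2.2 [m]
    else if m.2.2.2 = lowest then removeImprobbablemovesLoop rest lowest (acc ++ [m])
    else removeImprobbablemovesLoop rest lowest acc

def removeImprobbablemoves (moves : List (Int × (Int × Int × Int))) : List (Int × (Int × Int × Int)) :=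
  match PySem.List.pyGet? moves 0 with
  | none => []  -- moves[0] raises IndexError: excluded by Pre_
  | some m0 => removeImprobbablemovesLoop moves m0.2.2.2 []

-- ===== PORT B =====
def removeImprobbablemoves_alt (moves : List (Int × (Int × Int × Int))) : List (Int × (Int × Int × Int)) :=
  match moves with
  | [] => []  -- moves[0] raises IndexError: excluded by Pre_
  | m0 :: _ =>
    let lowest := moves.foldl (fun a m => min a m.2.2.2) m0.2.2.2
    moves.filter (fun m => m.2.2.2 == lowest)

-- ===== PRECONDITION & SPEC =====
def Pre_removeImprobbablemoves (moves : List (Int × (Int × Int × Int))) : Prop := moves ≠ []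
instance (moves : List (Int × (Int × Int × Int))) : Decidable (Pre_removeImprobbablemoves moves) := by unfold Pre_removeImprobbablemoves; infer_instance
def pvWitness_removeImprobbablemoves : (List (Int × (Int × Int × Int))) := [(1, (2, 3, 4)), (5, (6, 7, 4))]
def Spec_removeImprobbablemoves (moves : List (Int × (Int × Int × Int))) (out : List (Int × (Int × Int × Int))) : Prop := out = removeImprobbablemoves_alt moves
instance (moves : List (Int × (Int × Int × Int))) (out : List (Int × (Int × Int × Int))) : Decidable (Spec_removeImprobbablemoves moves out) := by unfold Spec_removeImprobbablemoves; infer_instance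

-- ===== CLAIM (what is proved, stated in full; the proofs are below) =====
def Claim_equal_removeImprobbablemoves : Prop := ∀ (moves : List (Int × (Int × Int × Int))), Dom_removeImprobbablemoves moves → Pre_removeImprobbablemoves moves → Spec_removeImprobbablemoves moves (removeImprobbablemoves moves)

-- ===== LEMMAS AND PROOFS =====
theorem foldl_min_le (l : List (Int × (Int × Int × Int))) (a : Int) :
    l.foldl (fun a m => min a m.2.2.2) a ≤ a := by
  induction l generalizing a with
  | nil => simp
  | cons m rest ih => simpa using le_trans (ih (min a m.2.2.2)) (min_le_left _ _)

-- characterisation of A's loop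
theorem loop_eq (l : List (Int × (Int × Int × Int))) (low : Int) (acc : List (Int × (Int × Int × Int))) :
    removeImprobbablemovesLoop l low acc =
      (if l.foldl (fun a m => min a m.2.2.2) low = low then acc else [])
        ++ l.filter (fun m => m.2.2.2 == l.foldl (fun a m => min a m.2.2.2) low) := by
  induction l generalizing low acc with
  | nil => simp [removeImprobbablemovesLoop]
  | cons m rest ih =>
    have hle := foldl_min_le rest
    simp only [removeImprobbablemovesLoop, List.foldl_cons]
    by_cases h1 : m.2.2.2 < low
    · have hmin : min low m.2.2.2 = m.2.2.2 := min_eq_right (le_of_lt h1)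
      rw [if_pos h1, ih]
      simp only [hmin]
      have hne : rest.foldl (fun a m => min a m.2.2.2) m.2.2.2 ≠ low :=
        ne_of_lt (lt_of_le_of_lt (hle _) h1)
      rw [if_neg hne, List.filter_cons]
      by_cases h2 : rest.foldl (fun a m => min a m.2.2.2) m.2.2.2 = m.2.2.2
      · simp [h2]
      · have : (m.2.2.2 == rest.foldl (fun a m => min a m.2.2.2) m.2.2.2) = false := by
          simp; exact fun h => h2 h.symm
        simp [this, h2]
    · rw [if_neg h1]
      have hmin : min low m.2.2.2 = low := min_eq_left (le_of_not_gt h1)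
      simp only [hmin]
      by_cases h2 : m.2.2.2 = low
      · rw [if_pos h2, ih, List.filter_cons]
        by_cases h3 : rest.foldl (fun a m => min a m.2.2.2) low = low
        · simp [h3, h2]
        · have : (m.2.2.2 == rest.foldl (fun a m => min a m.2.2.2) low) = false := by
            simp [h2]; exact fun h => h3 h.symm
          simp [this, h3]
      · rw [if_neg h2, ih, List.filter_cons]
        have hlt : rest.foldl (fun a m => min a m.2.2.2) low < m.2.2.2 :=
          lt_of_le_of_lt (hle _) (lt_of_le_of_ne (le_of_not_gt h1) (Ne.symm h2))
        have : (m.2.2.2 == rest.foldl (fun a m => min a m.2.2.2) low) = false := by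
          simp; omega
        simp [this]

-- ===== VERDICT (by name: the statement is the Claim_ definition above) =====
theorem removeImprobbablemoves_spec : Claim_equal_removeImprobbablemoves := by
  intro moves _ hpre
  unfold Spec_removeImprobbablemoves removeImprobbablemoves removeImprobbablemoves_alt
  match moves, hpre with
  | m0 :: rest, _ =>
    have hget : PySem.List.pyGet? (m0 :: rest) 0 = some m0 := by
      simp [PySem.List.pyGet?, PySem.List.pyIdx?]
    rw [hget]
    simp only [loop_eq, List.foldl_cons, min_self]
    split <;> simp
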